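-- pv_equiv track=rewrite | github.com/245charan/Vigyaa | 02.py | LeagueTable
-- ===== SOURCE A (Python) =====
-- def LeagueTable(ranked_score, player_score):
--     # get the unique ranks sorted descending
--     scores = sorted(list(set(ranked_score)), reverse=True)
--     player_ranks = []
--     for score in player_score:
--         while scores and score >= scores[-1]:
--             scores.pop()
--         player_ranks.append(len(scores) + 1)
--
--     return player_ranks
-- ===== SOURCE B (Python) =====
-- def LeagueTable(ranked_score, player_score):
--     # Prefix-maximum + hand-rolled bisect_right on the ascending unique scores
--     # instead of the stateful pop loop.
--     asc = sorted(set(ranked_score))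
--     n = len(asc)
--     ranks = []
--     hi = None
--     for score in player_score:
--         if hi is None or score > hi:
--             hi = score
--         lo, up = 0, n
--         while lo < up:
--             mid = (lo + up) // 2
--             if asc[mid] <= hi:
--                 lo = mid + 1
--             else:
--                 up = mid
--         ranks.append(n - lo + 1)
--     return ranks
-- ===== Notes on version B (the rewrite author's own statement) =====
-- stated objective: alternative
-- what changed: Replaces the stateful pop-from-end loop over the descending unique scores by a prefix running maximum plus a hand-rolled bisect_right binary search on the ascending unique scores, computing each rank as n - bisect_right(asc, hi) + 1.
import Mathlib
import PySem

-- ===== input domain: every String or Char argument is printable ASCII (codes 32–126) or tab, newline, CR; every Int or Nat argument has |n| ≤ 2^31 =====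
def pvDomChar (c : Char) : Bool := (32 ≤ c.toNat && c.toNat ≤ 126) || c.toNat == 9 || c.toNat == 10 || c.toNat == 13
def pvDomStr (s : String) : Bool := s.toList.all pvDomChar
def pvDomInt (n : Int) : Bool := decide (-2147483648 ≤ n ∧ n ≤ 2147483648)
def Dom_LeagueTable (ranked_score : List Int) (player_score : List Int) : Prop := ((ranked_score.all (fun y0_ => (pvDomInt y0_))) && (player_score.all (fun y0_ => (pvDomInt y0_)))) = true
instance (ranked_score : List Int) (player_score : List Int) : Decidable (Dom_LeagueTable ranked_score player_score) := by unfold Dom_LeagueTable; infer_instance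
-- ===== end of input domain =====

-- B replaces A's stateful pop-from-end loop over the descending unique scores by a
-- prefix running maximum plus a hand-rolled bisect_right on the ascending unique scores
-- (objective: alternative).

-- ===== PORT A =====
-- 'while scores and score >= scores[-1]: scores.pop()' — the guard checks non-emptiness
-- first, so 'scores[-1]' is exactly 'scores.getLast?' here (in range whenever read).
def popA (score : Int) (scores : List Int) : List Int :=
  match h : scores.getLast? with
  | some last => if score ≥ last then popA score scores.dropLast else scores
  | none => scores
termination_by scores.length
decreasing_by
  have hne : scores ≠ [] := by intro e; subst e; simp at h
  have := List.length_pos_iff.mpr hne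
  simp [List.length_dropLast]; omega

def LeagueTable (ranked_score : List Int) (player_score : List Int) : List Int :=
  -- scores = sorted(list(set(ranked_score)), reverse=True); the sort result on the
  -- distinct ints does not depend on the set's iteration order
  let scores := PySem.List.sorted (PySem.Set.ofList ranked_score) (fun x => x) true
  (player_score.foldl (fun st score =>
      let s := popA score st.1
      (s, st.2 ++ [((s.length : Int) + 1)])) (scores, ([] : List Int))).2

-- ===== PORT B =====
-- the 'while lo < up' bisect_right loop of Source B; 'asc[mid]' always has 0 ≤ mid < len(asc),
-- so 'getD mid 0' is exact there, and '(lo + up) // 2' on naturals is Nat division.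
def bisectLoop (asc : List Int) (x : Int) (lo up : Nat) : Nat :=
  if lo < up then
    let mid := (lo + up) / 2
    if asc.getD mid 0 ≤ x then bisectLoop asc x (mid + 1) up else bisectLoop asc x lo mid
  else lo
termination_by up - lo
decreasing_by all_goals omega

def LeagueTable_alt (ranked_score : List Int) (player_score : List Int) : List Int :=
  let asc := PySem.List.sorted (PySem.Set.ofList ranked_score) (fun x => x) false
  let n := asc.length
  (player_score.foldl (fun st score =>
      let hi := match st.1 with
        | none => score
        | some h => if score > h then score else h
      let lo := bisectLoop asc hi 0 n
      (some hi, st.2 ++ [((n : Int) - (lo : Int) + 1)])) ((none : Option Int), ([] : List Int))).2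

-- ===== PRECONDITION & SPEC =====
def Spec_LeagueTable (ranked_score : List Int) (player_score : List Int) (out : List Int) : Prop := out = LeagueTable_alt ranked_score player_score
instance (ranked_score : List Int) (player_score : List Int) (out : List Int) : Decidable (Spec_LeagueTable ranked_score player_score out) := by unfold Spec_LeagueTable; infer_instance

-- ===== CLAIM (what is proved, stated in full; the proofs are below) =====
def Claim_equal_LeagueTable : Prop := ∀ (ranked_score : List Int) (player_score : List Int), Dom_LeagueTable ranked_score player_score → Spec_LeagueTable ranked_score player_score (LeagueTable ranked_score player_score)

-- ===== LEMMAS AND PROOFS =====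

-- popA, seen from the front: popping from the end while score ≥ last is dropWhile (≤ score) on the reverse
theorem popA_reverse (s : Int) : ∀ r : List Int,
    popA s r.reverse = (r.dropWhile (fun a => decide (a ≤ s))).reverse := by
  intro r
  induction r with
  | nil => simp [popA]
  | cons a t ih =>
    rw [List.reverse_cons, popA]
    split
    case _ last hl =>
      rw [List.getLast?_append] at hl
      simp at hl
      subst hl
      by_cases hs : s ≥ a
      · rw [if_pos hs]
        rw [show (t.reverse ++ [a]).dropLast = t.reverse by simp]
        rw [ih]
        have : a ≤ s := hs
        simp [List.dropWhile_cons, this]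
      · rw [if_neg hs]
        have : ¬ (a ≤ s) := hs
        simp [List.dropWhile_cons, this]
    case _ hl =>
      rw [List.getLast?_append] at hl
      simp at hl

theorem popA_eq (s : Int) (l : List Int) :
    popA s l = (l.reverse.dropWhile (fun a => decide (a ≤ s))).reverse := by
  have := popA_reverse s l.reverse
  simpa using this

-- dropping (≤ s) after dropping (≤ h) with h ≤ s is dropping (≤ s)
theorem dropWhile_absorb (h s : Int) (hhs : h ≤ s) : ∀ l : List Int,
    (l.dropWhile (fun a => decide (a ≤ h))).dropWhile (fun a => decide (a ≤ s))
      = l.dropWhile (fun a => decide (a ≤ s)) := by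
  intro l
  induction l with
  | nil => rfl
  | cons a t ih =>
    by_cases ha : a ≤ h
    · simp [List.dropWhile_cons, ha, le_trans ha hhs, ih]
    · simp [List.dropWhile_cons, ha]

-- dropping (≤ s) after dropping (≤ h) with s ≤ h changes nothing
theorem dropWhile_absorb' (h s : Int) (hsh : s ≤ h) (l : List Int) :
    (l.dropWhile (fun a => decide (a ≤ h))).dropWhile (fun a => decide (a ≤ s))
      = l.dropWhile (fun a => decide (a ≤ h)) := by
  induction l with
  | nil => rfl
  | cons a t ih =>
    by_cases ha : a ≤ h
    · simp [List.dropWhile_cons, ha, ih]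
    · have : ¬ (a ≤ s) := by omega
      simp [List.dropWhile_cons, ha, this]

theorem takeWhile_lt_imp (p : Int → Bool) : ∀ (l : List Int) (i : Nat),
    i < (l.takeWhile p).length → p (l.getD i 0) = true := by
  intro l
  induction l with
  | nil => simp
  | cons a t ih =>
    intro i hi
    by_cases hp : p a
    · cases i with
      | zero => simpa using hp
      | succ j =>
        simp only [List.takeWhile_cons, hp, if_true] at hi
        simp only [List.length_cons] at hi
        simpa using ih j (by omega)
    · simp [hp] at hi

theorem dropWhile_getD (p : Int → Bool) : ∀ (l : List Int),
    (l.takeWhile p).length < l.length → p (l.getD (l.takeWhile p).length 0) = false := by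
  intro l
  induction l with
  | nil => simp
  | cons a t ih =>
    intro hl
    by_cases hp : p a
    · simp only [List.takeWhile_cons, hp, if_true, List.length_cons] at hl ⊢
      simpa using ih (by omega)
    · simp [hp]

-- bisect_right on a strictly increasing list finds the takeWhile (≤ x) length
theorem bisectLoop_eq (asc : List Int) (x : Int) (hasc : asc.Pairwise (· < ·)) :
    ∀ (n lo up : Nat), up - lo = n →
      lo ≤ (asc.takeWhile (fun a => decide (a ≤ x))).length →
      (asc.takeWhile (fun a => decide (a ≤ x))).length ≤ up → up ≤ asc.length →
      bisectLoop asc x lo up = (asc.takeWhile (fun a => decide (a ≤ x))).length := by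
  intro n
  induction n using Nat.strong_induction_on with
  | _ n ih =>
    intro lo up hn hlo hup hlen
    set k := (asc.takeWhile (fun a => decide (a ≤ x))).length with hk
    rw [bisectLoop]
    by_cases h : lo < up
    · rw [if_pos h]
      set mid := (lo + up) / 2 with hmid
      have hm1 : lo ≤ mid := by omega
      have hm2 : mid < up := by omega
      by_cases hcmp : asc.getD mid 0 ≤ x
      · rw [if_pos hcmp]
        have hmidk : mid < k := by
          by_contra hc
          have h2 : x < asc.getD mid 0 := by
            have hfail := dropWhile_getD (fun a => decide (a ≤ x)) asc (by omega)
            have hmono : asc.getD k 0 ≤ asc.getD mid 0 := by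
              rcases Nat.eq_or_lt_of_le (Nat.le_of_not_lt hc) with he | hlt
              · rw [he]
              · rw [List.getD_eq_getElem _ _ (by omega : k < asc.length),
                    List.getD_eq_getElem _ _ (by omega : mid < asc.length)]
                exact le_of_lt (List.pairwise_iff_getElem.mp hasc k mid (by omega) (by omega) hlt)
            rw [← hk] at hfail
            simp only [decide_eq_false_iff_not, not_le] at hfail
            omega
          omega
        exact ih (up - (mid + 1)) (by omega) (mid + 1) up (by omega) (by omega) hup hlen
      · rw [if_neg hcmp]
        have hmidk : k ≤ mid := by
          by_contra hc
          have := takeWhile_lt_imp (fun a => decide (a ≤ x)) asc mid (by omega)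
          simp only [decide_eq_true_eq] at this
          omega
        exact ih (mid - lo) (by omega) lo mid (by omega) hlo hmidk (by omega)
    · rw [if_neg h]; omega

-- A's loop state as a function of the running maximum of the processed player scores
def stateOf (asc : List Int) : Option Int → List Int
  | none => asc.reverse
  | some h => (asc.dropWhile (fun a => decide (a ≤ h))).reverse

def newHi (hiOpt : Option Int) (score : Int) : Int :=
  match hiOpt with
  | none => score
  | some h => if score > h then score else h

theorem popA_stateOf (asc : List Int) (score : Int) (hiOpt : Option Int) :
    popA score (stateOf asc hiOpt) = stateOf asc (some (newHi hiOpt score)) := by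
  cases hiOpt with
  | none => rw [popA_eq]; simp only [stateOf, newHi, List.reverse_reverse]; rfl
  | some h =>
    rw [popA_eq]
    simp only [stateOf, newHi, List.reverse_reverse]
    by_cases hs : score > h
    · have habs := dropWhile_absorb h score (le_of_lt hs) asc
      simp only [hs, if_true, habs]
    · have habs := dropWhile_absorb' h score (by omega) asc
      simp only [hs, if_false, habs]

theorem len_stateOf (asc : List Int) (hasc : asc.Pairwise (· < ·)) (h : Int) :
    ((stateOf asc (some h)).length : Int) + 1
      = (asc.length : Int) - (bisectLoop asc h 0 asc.length : Int) + 1 := by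
  have hb := bisectLoop_eq asc h hasc asc.length 0 asc.length rfl (Nat.zero_le _)
    ((List.takeWhile_prefix _).length_le) (le_refl _)
  rw [hb]
  have hsplit := congrArg List.length
    (List.takeWhile_append_dropWhile (p := fun a => decide (a ≤ h)) (l := asc))
  rw [List.length_append] at hsplit
  simp only [stateOf, List.length_reverse]
  omega

theorem main_inv (asc : List Int) (hasc : asc.Pairwise (· < ·)) :
    ∀ (ps : List Int) (hiOpt : Option Int) (acc : List Int),
      (ps.foldl (fun st score =>
          let s := popA score st.1
          (s, st.2 ++ [((s.length : Int) + 1)])) (stateOf asc hiOpt, acc)).2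
      = (ps.foldl (fun st score =>
          let hi := match st.1 with
            | none => score
            | some h => if score > h then score else h
          let lo := bisectLoop asc hi 0 asc.length
          (some hi, st.2 ++ [((asc.length : Int) - (lo : Int) + 1)])) (hiOpt, acc)).2 := by
  intro ps
  induction ps with
  | nil => intro hiOpt acc; rfl
  | cons score t ih =>
    intro hiOpt acc
    rw [List.foldl_cons, List.foldl_cons]
    have hB : (match hiOpt with
        | none => score
        | some h => if score > h then score else h) = newHi hiOpt score := by
      cases hiOpt <;> rfl
    simp only [popA_stateOf, hB, len_stateOf asc hasc (newHi hiOpt score)]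
    exact ih (some (newHi hiOpt score)) _

-- ===== VERDICT (by name: the statement is the Claim_ definition above) =====
theorem LeagueTable_spec : Claim_equal_LeagueTable := by
  intro rs ps _
  unfold Spec_LeagueTable LeagueTable LeagueTable_alt
  have hp : (PySem.List.sorted (PySem.Set.ofList rs) (fun x => x) false).Pairwise (· < ·) := by
    simpa using PySem.List.sorted_ofList_pairwise_lt rs
  have hd : PySem.List.sorted (PySem.Set.ofList rs) (fun x => x) true
      = (PySem.List.sorted (PySem.Set.ofList rs) (fun x => x) false).reverse := by
    apply PySem.List.sorted_rev_eq_of_perm_of_pairwise_gt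
    · exact (List.reverse_perm _).trans (PySem.List.sorted_perm _ _ _)
    · exact List.pairwise_reverse.mpr hp
  have := main_inv _ hp ps none []
  simp only [stateOf] at this
  rw [hd]
  exact this
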